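-- pv_equiv track=rewrite | github.com/lvanbuiten/AOC2023 | support/support.py | format_coords_hash_values
-- ===== SOURCE A (Python) =====
-- def format_coords_hash_values(coords: dict) -> str:
--     min_x = min(x for x, _ in coords)
--     max_x = max(x for x, _ in coords)
--     min_y = min(y for _, y in coords)
--     max_y = max(y for _, y in coords)
--     return '\n'.join(
--         ''.join(
--             coords.get((x,y), '.')
--             for x in range(min_x, max_x + 1)
--         )
--         for y in range(min_y, max_y + 1)
--     )
-- ===== SOURCE B (Python) =====
-- def format_coords_hash_values(coords: dict) -> str:
--     it = iter(coords)
--     x0, y0 = next(it)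
--     min_x = max_x = x0
--     min_y = max_y = y0
--     for x, y in it:
--         if x < min_x: min_x = x
--         if x > max_x: max_x = x
--         if y < min_y: min_y = y
--         if y > max_y: max_y = y
--     rows = [['.'] * (max_x - min_x + 1) for _ in range(min_y, max_y + 1)]
--     for (x, y), v in coords.items():
--         rows[y - min_y][x - min_x] = v
--     return '\n'.join(''.join(row) for row in rows)
-- ===== Notes on version B (the rewrite author's own statement) =====
-- stated objective: alternative
-- what changed: B computes the four bounds in one pass and inverts the rendering: instead of a per-cell dict lookup over the whole grid (gather), it allocates a mutable '.'-filled 2D buffer and scatters each point's value into rows[y-min_y][x-min_x] before joining the rows.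
import Mathlib
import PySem

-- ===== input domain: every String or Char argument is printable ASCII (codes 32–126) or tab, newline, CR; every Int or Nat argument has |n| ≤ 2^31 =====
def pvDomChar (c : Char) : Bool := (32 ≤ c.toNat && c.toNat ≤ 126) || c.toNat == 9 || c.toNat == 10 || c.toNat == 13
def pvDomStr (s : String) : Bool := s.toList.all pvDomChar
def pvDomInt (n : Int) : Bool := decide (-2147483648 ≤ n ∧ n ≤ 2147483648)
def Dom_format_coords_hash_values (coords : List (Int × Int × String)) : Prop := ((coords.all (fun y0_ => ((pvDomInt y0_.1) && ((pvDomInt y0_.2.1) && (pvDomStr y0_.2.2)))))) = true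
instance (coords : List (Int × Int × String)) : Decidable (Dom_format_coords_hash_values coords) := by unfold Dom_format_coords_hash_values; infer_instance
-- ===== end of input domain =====

-- B renders the grid by scattering each point into a pre-filled '.' buffer instead of
-- A's per-cell dict lookup (gather); same output, an alternative traversal order.

-- ===== PORT A =====
-- coords.get((x,y), '.') on the association-list encoding of the dict: first match wins
def pvGet (coords : List (Int × Int × String)) (x y : Int) : String :=
  match coords.find? (fun t => t.1 == x && t.2.1 == y) with
  | some t => t.2.2
  | none => "."

def format_coords_hash_values (coords : List (Int × Int × String)) : String :=
  match PySem.List.min? (coords.map (·.1)) (fun v => v),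
        PySem.List.max? (coords.map (·.1)) (fun v => v),
        PySem.List.min? (coords.map (·.2.1)) (fun v => v),
        PySem.List.max? (coords.map (·.2.1)) (fun v => v) with
  | some mnx, some mxx, some mny, some mxy =>
      PySem.Str.join "\n" ((PySem.List.pyRange mny (mxy + 1)).map (fun y =>
        PySem.Str.join "" ((PySem.List.pyRange mnx (mxx + 1)).map (fun x =>
          pvGet coords x y))))
  | _, _, _, _ => ""  -- unreachable under Pre_ (empty dict: Python raises ValueError)

-- ===== PORT B =====
-- the single pass over the remaining points maintaining (min_x, max_x, min_y, max_y)
def pvBounds (rest : List (Int × Int × String)) (b0 : Int × Int × Int × Int) : Int × Int × Int × Int :=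
  rest.foldl (fun b t =>
    let mnx := if t.1 < b.1 then t.1 else b.1
    let mxx := if t.1 > b.2.1 then t.1 else b.2.1
    let mny := if t.2.1 < b.2.2.1 then t.2.1 else b.2.2.1
    let mxy := if t.2.1 > b.2.2.2 then t.2.1 else b.2.2.2
    (mnx, mxx, mny, mxy)) b0

-- the scatter loop: rows[y - min_y][x - min_x] = v for each point
def pvScatter (mnx mny : Int) (rows : List (List String)) (coords : List (Int × Int × String)) : List (List String) :=
  coords.foldl (fun rs t =>
    rs.set (t.2.1 - mny).toNat ((rs.getD (t.2.1 - mny).toNat []).set (t.1 - mnx).toNat t.2.2)) rows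

def format_coords_hash_values_alt (coords : List (Int × Int × String)) : String :=
  match coords with
  | [] => ""  -- unreachable under Pre_ (empty dict: next(it) raises StopIteration)
  | t0 :: rest =>
    let b := pvBounds rest (t0.1, t0.1, t0.2.1, t0.2.1)
    let rows0 := (PySem.List.pyRange b.2.2.1 (b.2.2.2 + 1)).map (fun _ =>
      List.replicate (b.2.1 - b.1 + 1).toNat ".")
    PySem.Str.join "\n" ((pvScatter b.1 b.2.2.1 rows0 coords).map (fun row => PySem.Str.join "" row))

-- ===== PRECONDITION & SPEC =====
-- Pre_ excludes the empty dict, on which A's min() raises ValueError (B's next() raises StopIteration), and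
-- association lists with duplicate (x,y) keys, which cannot arise from a real Python dict
-- but on which the two list encodings disagree (A: first match wins, B: last write wins).
def Pre_format_coords_hash_values (coords : List (Int × Int × String)) : Prop :=
  coords ≠ [] ∧ (coords.map (fun t => (t.1, t.2.1))).Nodup
instance (coords : List (Int × Int × String)) : Decidable (Pre_format_coords_hash_values coords) := by unfold Pre_format_coords_hash_values; infer_instance
def pvWitness_format_coords_hash_values : (List (Int × Int × String)) := [(0, 0, "a"), (2, 1, "#")]

def Spec_format_coords_hash_values (coords : List (Int × Int × String)) (out : String) : Prop := out = format_coords_hash_values_alt coords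
instance (coords : List (Int × Int × String)) (out : String) : Decidable (Spec_format_coords_hash_values coords out) := by unfold Spec_format_coords_hash_values; infer_instance

-- ===== CLAIM (what is proved, stated in full; the proofs are below) =====
def Claim_equal_format_coords_hash_values : Prop := ∀ (coords : List (Int × Int × String)), Dom_format_coords_hash_values coords → Pre_format_coords_hash_values coords → Spec_format_coords_hash_values coords (format_coords_hash_values coords)

-- ===== LEMMAS AND PROOFS =====

theorem pvGetD_set {α : Type} (l : List α) (k : Nat) (v : α) (i : Nat) (d : α) :
    (l.set k v).getD i d = if k = i ∧ k < l.length then v else l.getD i d := by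
  simp only [List.getD_eq_getElem?_getD, List.getElem?_set]
  by_cases h1 : k = i
  · subst h1
    by_cases h2 : k < l.length <;> simp [h2]
  · rw [if_neg h1, if_neg (fun h => h1 h.1)]

theorem pvScatter_length (mnx mny : Int) (coords : List (Int × Int × String))
    (rows : List (List String)) : (pvScatter mnx mny rows coords).length = rows.length := by
  induction coords generalizing rows with
  | nil => rfl
  | cons t ts ih =>
      show (pvScatter mnx mny _ ts).length = _
      rw [ih]; simp

theorem pvScatter_row_length (mnx mny : Int) (coords : List (Int × Int × String))
    (rows : List (List String)) (i : Nat) :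
    ((pvScatter mnx mny rows coords).getD i []).length = (rows.getD i []).length := by
  induction coords generalizing rows with
  | nil => rfl
  | cons t ts ih =>
      show ((pvScatter mnx mny _ ts).getD i []).length = _
      rw [ih, pvGetD_set]
      split_ifs with h
      · rw [h.1]; simp
      · rfl

theorem pvScatter_cell (mnx mny : Int) (coords : List (Int × Int × String))
    (rows : List (List String)) (i j : Nat)
    (hb : ∀ t ∈ coords, mnx ≤ t.1 ∧ mny ≤ t.2.1)
    (hnd : (coords.map (fun t => (t.1, t.2.1))).Nodup)
    (hsh : ∀ t ∈ coords, (t.2.1 - mny).toNat < rows.length ∧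
        (t.1 - mnx).toNat < (rows.getD (t.2.1 - mny).toNat []).length) :
    ((pvScatter mnx mny rows coords).getD i []).getD j "." =
      (match coords.find? (fun t => t.1 == mnx + (j : Int) && t.2.1 == mny + (i : Int)) with
       | some t => t.2.2
       | none => (rows.getD i []).getD j ".") := by
  induction coords generalizing rows with
  | nil => rfl
  | cons t ts ih =>
      have hbt := hb t (by simp)
      have hsht := hsh t (by simp)
      rw [List.map_cons] at hnd
      obtain ⟨hhead, hnd'⟩ := List.nodup_cons.mp hnd
      have hstep : pvScatter mnx mny rows (t :: ts) =
          pvScatter mnx mny (rows.set (t.2.1 - mny).toNat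
            ((rows.getD (t.2.1 - mny).toNat []).set (t.1 - mnx).toNat t.2.2)) ts := rfl
      set rows' := rows.set (t.2.1 - mny).toNat
          ((rows.getD (t.2.1 - mny).toNat []).set (t.1 - mnx).toNat t.2.2) with hrows'
      have hlen' : rows'.length = rows.length := by simp [hrows']
      have hrowD : ∀ k : Nat, (rows'.getD k []) =
          if (t.2.1 - mny).toNat = k then
            ((rows.getD (t.2.1 - mny).toNat []).set (t.1 - mnx).toNat t.2.2)
          else rows.getD k [] := by
        intro k
        rw [hrows', pvGetD_set]
        by_cases h : (t.2.1 - mny).toNat = k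
        · rw [if_pos ⟨h, hsht.1⟩, if_pos h]
        · rw [if_neg (fun hh => h hh.1), if_neg h]
      have hrowlen' : ∀ k : Nat, (rows'.getD k []).length = (rows.getD k []).length := by
        intro k; rw [hrowD]; split_ifs with h1
        · rw [← h1]; simp
        · rfl
      rw [hstep, ih rows' (fun u hu => hb u (List.mem_cons_of_mem _ hu)) hnd'
        (fun u hu => by
          rw [hlen', hrowlen']
          exact hsh u (List.mem_cons_of_mem _ hu))]
      by_cases hp : (t.1 == mnx + (j : Int) && t.2.1 == mny + (i : Int)) = true
      · -- t itself occupies cell (i, j); no later element shares its key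
        have hkey : t.1 = mnx + (j : Int) ∧ t.2.1 = mny + (i : Int) := by
          simpa using hp
        have hnone : ts.find? (fun u => u.1 == mnx + (j : Int) && u.2.1 == mny + (i : Int)) = none := by
          rw [List.find?_eq_none]
          intro u hu hpu
          have hmem : (t.1, t.2.1) ∈ ts.map (fun u => (u.1, u.2.1)) := by
            have : u.1 = mnx + (j : Int) ∧ u.2.1 = mny + (i : Int) := by simpa using hpu
            exact List.mem_map.mpr ⟨u, hu, by rw [hkey.1, hkey.2, this.1, this.2]⟩
          exact hhead hmem
        rw [List.find?_cons_of_pos (p := fun u : Int × Int × String => u.1 == mnx + (j : Int) && u.2.1 == mny + (i : Int)) hp, hnone]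
        have hit : (t.2.1 - mny).toNat = i := by omega
        have hjt : (t.1 - mnx).toNat = j := by omega
        rw [hrowD, if_pos hit, pvGetD_set, if_pos ⟨hjt, hsht.2⟩]
      · -- t occupies a different cell: the write does not touch (i, j)
        have hkey : ¬(t.1 = mnx + (j : Int) ∧ t.2.1 = mny + (i : Int)) := by
          intro h; exact hp (by simp [h.1, h.2])
        rw [List.find?_cons_of_neg (p := fun u : Int × Int × String => u.1 == mnx + (j : Int) && u.2.1 == mny + (i : Int)) hp]
        cases hf : ts.find? (fun u => u.1 == mnx + (j : Int) && u.2.1 == mny + (i : Int)) with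
        | some u => rfl
        | none =>
            show (rows'.getD i []).getD j "." = (rows.getD i []).getD j "."
            rw [hrowD]
            split_ifs with h1
            · have hit : t.2.1 = mny + (i : Int) := by omega
              have hjt : t.1 ≠ mnx + (j : Int) := fun h => hkey ⟨h, hit⟩
              have hne : (t.1 - mnx).toNat ≠ j := by omega
              rw [pvGetD_set, if_neg (fun hh => hne hh.1), h1]
            · rfl

theorem pvGrid_eq (mnx mxx mny mxy : Int) (coords : List (Int × Int × String))
    (hb : ∀ t ∈ coords, mnx ≤ t.1 ∧ t.1 ≤ mxx ∧ mny ≤ t.2.1 ∧ t.2.1 ≤ mxy)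
    (hnd : (coords.map (fun t => (t.1, t.2.1))).Nodup) :
    pvScatter mnx mny ((PySem.List.pyRange mny (mxy + 1)).map (fun _ =>
        List.replicate (mxx - mnx + 1).toNat ".")) coords =
      (PySem.List.pyRange mny (mxy + 1)).map (fun y =>
        (PySem.List.pyRange mnx (mxx + 1)).map (fun x => pvGet coords x y)) := by
  set rows0 := (PySem.List.pyRange mny (mxy + 1)).map (fun _ =>
      List.replicate (mxx - mnx + 1).toNat ("." : String)) with hrows0
  have hH : rows0.length = (mxy + 1 - mny).toNat := by
    simp [hrows0, PySem.List.length_pyRange_one]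
  have hrow0 : ∀ k : Nat, k < rows0.length →
      rows0.getD k [] = List.replicate (mxx - mnx + 1).toNat ("." : String) := by
    intro k hk
    rw [List.getD_eq_getElem _ _ hk]
    simp [hrows0]
  have hW : ∀ k : Nat, k < rows0.length → (rows0.getD k []).length = (mxx + 1 - mnx).toNat := by
    intro k hk; rw [hrow0 k hk]; simp; omega
  have hsh : ∀ t ∈ coords, (t.2.1 - mny).toNat < rows0.length ∧
      (t.1 - mnx).toNat < (rows0.getD (t.2.1 - mny).toNat []).length := by
    intro t ht
    have hbt := hb t ht
    have h1 : (t.2.1 - mny).toNat < rows0.length := by rw [hH]; omega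
    exact ⟨h1, by rw [hW _ h1]; omega⟩
  apply List.ext_getElem
  · rw [pvScatter_length, hH]; simp [PySem.List.length_pyRange_one]
  · intro i hi1 hi2
    have hiH : i < rows0.length := by rwa [pvScatter_length] at hi1
    have hiS : i < (pvScatter mnx mny rows0 coords).length := by
      rwa [pvScatter_length]
    have h1 : (pvScatter mnx mny rows0 coords)[i]'hiS =
        (pvScatter mnx mny rows0 coords).getD i [] :=
      (List.getD_eq_getElem _ _ hiS).symm
    apply List.ext_getElem
    · simp only [h1, List.getElem_map]
      rw [pvScatter_row_length, hW i hiH]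
      simp [PySem.List.length_pyRange_one]
    · intro j hj1 hj2
      have hjW : j < (mxx + 1 - mnx).toNat := by
        simpa [PySem.List.length_pyRange_one] using hj2
      have hjS : j < ((pvScatter mnx mny rows0 coords).getD i []).length := by
        rw [pvScatter_row_length, hW i hiH]; exact hjW
      have h2 : ((pvScatter mnx mny rows0 coords).getD i []).getD j "." =
          ((pvScatter mnx mny rows0 coords).getD i [])[j]'hjS :=
        List.getD_eq_getElem _ _ hjS
      simp only [List.getElem_map, PySem.List.getElem_pyRange_one, h1, ← h2]
      rw [pvScatter_cell mnx mny coords rows0 i j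
        (fun t ht => ⟨(hb t ht).1, (hb t ht).2.2.1⟩) hnd hsh, hrow0 i hiH]
      unfold pvGet
      cases coords.find? (fun t => t.1 == mnx + (j : Int) && t.2.1 == mny + (i : Int)) with
      | some t => rfl
      | none =>
          have hjR : j < (List.replicate (mxx - mnx + 1).toNat ("." : String)).length := by
            simp; omega
          rw [List.getD_eq_getElem _ _ hjR]
          simp

theorem pvBounds_eq (rest : List (Int × Int × String)) (a b c d : Int) :
    pvBounds rest (a, b, c, d) =
      ((rest.map (·.1)).foldl min a, (rest.map (·.1)).foldl max b,
       (rest.map (·.2.1)).foldl min c, (rest.map (·.2.1)).foldl max d) := by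
  induction rest generalizing a b c d with
  | nil => rfl
  | cons t ts ih =>
      have hstep : pvBounds (t :: ts) (a, b, c, d) = pvBounds ts
          (if t.1 < a then t.1 else a, if t.1 > b then t.1 else b,
           if t.2.1 < c then t.2.1 else c, if t.2.1 > d then t.2.1 else d) := rfl
      have hmin : ∀ u v : Int, (if v < u then v else u) = min u v := by
        intro u v; rw [min_def]; split_ifs <;> omega
      have hmax : ∀ u v : Int, (if v > u then v else u) = max u v := by
        intro u v; rw [max_def]; split_ifs <;> omega
      rw [hstep, ih, List.map_cons, List.map_cons, List.foldl_cons, List.foldl_cons,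
        List.foldl_cons, List.foldl_cons, hmin, hmax, hmin, hmax]

-- ===== VERDICT (by name: the statement is the Claim_ definition above) =====
theorem format_coords_hash_values_spec : Claim_equal_format_coords_hash_values := by
  intro coords _ hpre
  unfold Spec_format_coords_hash_values format_coords_hash_values format_coords_hash_values_alt
  obtain ⟨hne, hnd⟩ := hpre
  cases coords with
  | nil => exact absurd rfl hne
  | cons t0 rest =>
    have hmnx : PySem.List.min? ((t0 :: rest).map (·.1)) (fun v => v) =
        some ((rest.map (·.1)).foldl min t0.1) := by
      rw [List.map_cons]; exact PySem.List.min?_id_cons t0.1 (rest.map (·.1))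
    have hmxx : PySem.List.max? ((t0 :: rest).map (·.1)) (fun v => v) =
        some ((rest.map (·.1)).foldl max t0.1) := by
      rw [List.map_cons]; exact PySem.List.max?_id_cons t0.1 (rest.map (·.1))
    have hmny : PySem.List.min? ((t0 :: rest).map (·.2.1)) (fun v => v) =
        some ((rest.map (·.2.1)).foldl min t0.2.1) := by
      rw [List.map_cons]; exact PySem.List.min?_id_cons t0.2.1 (rest.map (·.2.1))
    have hmxy : PySem.List.max? ((t0 :: rest).map (·.2.1)) (fun v => v) =
        some ((rest.map (·.2.1)).foldl max t0.2.1) := by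
      rw [List.map_cons]; exact PySem.List.max?_id_cons t0.2.1 (rest.map (·.2.1))
    set mnx := (rest.map (·.1)).foldl min t0.1 with hd1
    set mxx := (rest.map (·.1)).foldl max t0.1 with hd2
    set mny := (rest.map (·.2.1)).foldl min t0.2.1 with hd3
    set mxy := (rest.map (·.2.1)).foldl max t0.2.1 with hd4
    rw [hmnx, hmxx, hmny, hmxy]
    dsimp only
    rw [pvBounds_eq]
    dsimp only
    have hb : ∀ t ∈ t0 :: rest, mnx ≤ t.1 ∧ t.1 ≤ mxx ∧ mny ≤ t.2.1 ∧ t.2.1 ≤ mxy := by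
      intro t ht
      exact ⟨PySem.List.min?_isMin hmnx _ (List.mem_map.mpr ⟨t, ht, rfl⟩),
        PySem.List.max?_isMax hmxx _ (List.mem_map.mpr ⟨t, ht, rfl⟩),
        PySem.List.min?_isMin hmny _ (List.mem_map.mpr ⟨t, ht, rfl⟩),
        PySem.List.max?_isMax hmxy _ (List.mem_map.mpr ⟨t, ht, rfl⟩)⟩
    rw [pvGrid_eq mnx mxx mny mxy (t0 :: rest) hb hnd, List.map_map]
    rfl
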